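-- pv_equiv track=rewrite | github.com/IveNooName/Quasarr | quasarr/api/sponsors_helper/__init__.py | prioritize_helper_supported_links
-- ===== SOURCE A (Python) =====
-- def normalize_helper_supported_urls(url_patterns):
--     if not isinstance(url_patterns, (list, tuple, set)):
--         return []
--
--     normalized_patterns = []
--     seen_patterns = set()
--
--     for pattern in url_patterns:
--         if pattern is None:
--             continue
--
--         normalized_pattern = str(pattern).strip().lower()
--         if not normalized_pattern or normalized_pattern in seen_patterns:
--             continue
--
--         normalized_patterns.append(normalized_pattern)
--         seen_patterns.add(normalized_pattern)
--
--     return normalized_patterns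
--
-- def extract_helper_candidate_url(link):
--     if isinstance(link, (list, tuple)) and link:
--         candidate = link[0]
--     else:
--         candidate = link
--
--     if not isinstance(candidate, str):
--         return ""
--
--     return candidate.strip()
--
-- def prioritize_helper_supported_links(links, supported_url_patterns):
--     if not isinstance(links, list):
--         return [], []
--
--     normalized_patterns = normalize_helper_supported_urls(supported_url_patterns)
--     if not normalized_patterns:
--         return list(links), list(links)
--
--     supported_links = []
--     unsupported_links = []
--
--     for link in links:
--         candidate_url = extract_helper_candidate_url(link).lower()
--         if candidate_url and any(
--             pattern in candidate_url for pattern in normalized_patterns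
--         ):
--             supported_links.append(link)
--         else:
--             unsupported_links.append(link)
--
--     return supported_links + unsupported_links, supported_links
-- ===== SOURCE B (Python) =====
-- def prioritize_helper_supported_links(links, supported_url_patterns):
--     if not isinstance(links, list):
--         return [], []
--
--     if isinstance(supported_url_patterns, (list, tuple, set)):
--         normalized = [str(p).strip().lower() for p in supported_url_patterns if p is not None]
--     else:
--         normalized = []
--     patterns = [p for p in normalized if p]
--     if not patterns:
--         return list(links), list(links)
--
--     # index patterns by their first character: while scanning a URL position by
--     # position, only patterns that can possibly start there are tried
--     buckets = {}
--     for p in patterns: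
--         buckets.setdefault(p[0], []).append(p)
--
--     def matches(link):
--         url = link[0] if isinstance(link, (list, tuple)) and link else link
--         if not isinstance(url, str):
--             return False
--         url = url.strip().lower()
--         for i, ch in enumerate(url):
--             for p in buckets.get(ch, ()):
--                 if url.startswith(p, i):
--                     return True
--         return False
--
--     flags = list(map(matches, links))
--     head = [link for link, ok in zip(links, flags) if ok]
--     tail = [link for link, ok in zip(links, flags) if not ok]
--     return head + tail, head
-- ===== Notes on version B (the rewrite author's own statement) =====
-- stated objective: alternative
-- what changed: B replaces A's per-pattern substring test (any(pattern in url)) by a first-character index: patterns are bucketed once by leading character and each URL is scanned position by position via startswith, trying only the bucket of the current character; flags are computed once and the partition is done by two zip-filter passes instead of A's accumulator loop.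
import Mathlib
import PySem

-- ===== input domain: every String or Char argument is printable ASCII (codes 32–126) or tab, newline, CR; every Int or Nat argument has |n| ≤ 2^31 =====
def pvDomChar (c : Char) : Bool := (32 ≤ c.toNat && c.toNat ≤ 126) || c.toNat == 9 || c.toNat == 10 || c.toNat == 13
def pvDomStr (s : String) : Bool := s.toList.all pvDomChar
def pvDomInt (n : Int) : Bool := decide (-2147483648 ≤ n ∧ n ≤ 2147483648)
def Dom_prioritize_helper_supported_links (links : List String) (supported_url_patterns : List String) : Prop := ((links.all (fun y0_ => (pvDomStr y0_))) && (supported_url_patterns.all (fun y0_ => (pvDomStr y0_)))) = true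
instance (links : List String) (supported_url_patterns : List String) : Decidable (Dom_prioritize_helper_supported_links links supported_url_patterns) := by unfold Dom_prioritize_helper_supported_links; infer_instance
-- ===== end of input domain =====

-- B indexes the patterns by first character and scans each URL position by position,
-- trying only the bucket of the current character, instead of A's any(pattern in url);
-- the partition is two staged filter passes instead of A's accumulator loop (alternative).

-- ===== PORT A =====
-- On String arguments, `str(pattern)` / the tuple branch of extract are identity.
def normalize_helper_supported_urls (url_patterns : List String) : List String :=
  (url_patterns.foldl
    (fun (acc : List String × PySem.Set String) pattern =>
      let np := PySem.Str.lower (PySem.Str.strip pattern)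
      if np == "" || PySem.Set.contains acc.2 np then acc
      else (acc.1 ++ [np], PySem.Set.add acc.2 np))
    ([], PySem.Set.empty)).1

def extract_helper_candidate_url (link : String) : String := PySem.Str.strip link

def prioritize_helper_supported_links (links : List String) (supported_url_patterns : List String) : List String × List String :=
  let normalized_patterns := normalize_helper_supported_urls supported_url_patterns
  if normalized_patterns == [] then (links, links)
  else
    let r := links.foldl
      (fun (acc : List String × List String) link =>
        let candidate_url := PySem.Str.lower (extract_helper_candidate_url link)
        if !(candidate_url == "") && normalized_patterns.any (fun pattern => PySem.Str.isIn pattern candidate_url)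
        then (acc.1 ++ [link], acc.2)
        else (acc.1, acc.2 ++ [link]))
      ([], [])
    (r.1 ++ r.2, r.1)

-- ===== PORT B =====
def pvBpatterns (supported_url_patterns : List String) : List String :=
  (supported_url_patterns.map (fun p => PySem.Str.lower (PySem.Str.strip p))).filter
    (fun p => !(p == ""))

-- p[0] in Source B: every p in the filtered list is nonempty, so headD's default is never used
def pvBbuckets (patterns : List String) : PySem.Dict Char (List String) :=
  patterns.foldl (fun d p => d.modify (p.toList.headD ' ') [] (· ++ [p])) PySem.Dict.empty

-- url.startswith(p, i): p.toList is a prefix of url.toList dropped at i (i ≥ 0 from enumerate)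
def pvBmatches (buckets : PySem.Dict Char (List String)) (link : String) : Bool :=
  let url := PySem.Str.lower (PySem.Str.strip link)
  (PySem.List.enumerate url.toList).any (fun q =>
    (buckets.getD q.2 []).any (fun p => p.toList.isPrefixOf (url.toList.drop q.1.toNat)))

def prioritize_helper_supported_links_alt (links : List String) (supported_url_patterns : List String) : List String × List String :=
  let patterns := pvBpatterns supported_url_patterns
  if patterns == [] then (links, links)
  else
    let buckets := pvBbuckets patterns
    let flags := links.map (pvBmatches buckets)
    let head := ((links.zip flags).filter (fun q => q.2)).map (fun q => q.1)
    let tail := ((links.zip flags).filter (fun q => !q.2)).map (fun q => q.1)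
    (head ++ tail, head)

-- ===== PRECONDITION & SPEC =====
def Spec_prioritize_helper_supported_links (links : List String) (supported_url_patterns : List String) (out : List String × List String) : Prop := out = prioritize_helper_supported_links_alt links supported_url_patterns
instance (links : List String) (supported_url_patterns : List String) (out : List String × List String) : Decidable (Spec_prioritize_helper_supported_links links supported_url_patterns out) := by unfold Spec_prioritize_helper_supported_links; infer_instance

-- ===== CLAIM (what is proved, stated in full; the proofs are below) =====
def Claim_equal_prioritize_helper_supported_links : Prop := ∀ (links : List String) (supported_url_patterns : List String), Dom_prioritize_helper_supported_links links supported_url_patterns → Spec_prioritize_helper_supported_links links supported_url_patterns (prioritize_helper_supported_links links supported_url_patterns)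

-- ===== LEMMAS AND PROOFS =====

-- A's seen-set loop: the list and the set components coincide, collapsing to a single-list fold.
def pvG (s : List String) (p : String) : List String :=
  let np := PySem.Str.lower (PySem.Str.strip p)
  if np == "" || PySem.Set.contains s np then s else s ++ [np]

theorem pv_norm_collapse (l : List String) (s : List String) :
    l.foldl
      (fun (acc : List String × PySem.Set String) pattern =>
        let np := PySem.Str.lower (PySem.Str.strip pattern)
        if np == "" || PySem.Set.contains acc.2 np then acc
        else (acc.1 ++ [np], PySem.Set.add acc.2 np))
      (s, s) = (l.foldl pvG s, l.foldl pvG s) := by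
  induction l generalizing s with
  | nil => rfl
  | cons p t ih =>
    simp only [List.foldl_cons]
    by_cases h : (PySem.Str.lower (PySem.Str.strip p) == "" || PySem.Set.contains s (PySem.Str.lower (PySem.Str.strip p))) = true
    · simp only [pvG, h, if_pos] at *
      simpa [h] using ih s
    · have hnm : PySem.Str.lower (PySem.Str.strip p) ∉ s := by
        simp only [Bool.or_eq_true, not_or] at h
        intro hm
        exact h.2 (by simpa [PySem.Set.contains_iff] using hm)
      simp only [pvG, h]
      simp only [Bool.not_eq_true] at h
      simpa [h, PySem.Set.add_of_not_mem hnm] using ih (s ++ [PySem.Str.lower (PySem.Str.strip p)])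

theorem pv_mem_foldl_pvG (l : List String) (s : List String) (x : String) :
    x ∈ l.foldl pvG s ↔ x ∈ s ∨ ∃ p ∈ l, x = PySem.Str.lower (PySem.Str.strip p) ∧ x ≠ "" := by
  induction l generalizing s with
  | nil => simp
  | cons p t ih =>
    simp only [List.foldl_cons, ih]
    have hstep : x ∈ pvG s p ↔ x ∈ s ∨ (x = PySem.Str.lower (PySem.Str.strip p) ∧ x ≠ "") := by
      by_cases h : (PySem.Str.lower (PySem.Str.strip p) == "" || PySem.Set.contains s (PySem.Str.lower (PySem.Str.strip p))) = true
      · simp only [pvG, h, if_pos]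
        simp only [Bool.or_eq_true, beq_iff_eq, PySem.Set.contains_iff] at h
        constructor
        · exact Or.inl
        · rintro (hm | ⟨rfl, hne⟩)
          · exact hm
          · rcases h with h | h
            · exact absurd h hne
            · exact h
      · simp only [pvG]
        rw [if_neg h]
        simp only [Bool.or_eq_true, not_or, Bool.not_eq_true, beq_eq_false_iff_ne] at h
        simp only [List.mem_append, List.mem_singleton]
        constructor
        · rintro (hm | rfl)
          · exact Or.inl hm
          · exact Or.inr ⟨rfl, h.1⟩
        · rintro (hm | ⟨rfl, _⟩)
          · exact Or.inl hm
          · exact Or.inr rfl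
    rw [hstep]
    constructor
    · rintro ((h | h) | ⟨q, hq, hx⟩)
      · exact Or.inl h
      · exact Or.inr ⟨p, List.mem_cons_self, h⟩
      · exact Or.inr ⟨q, List.mem_cons_of_mem p hq, hx⟩
    · rintro (h | ⟨q, hq, hx⟩)
      · exact Or.inl (Or.inl h)
      · rcases List.mem_cons.mp hq with rfl | hq'
        · exact Or.inl (Or.inr hx)
        · exact Or.inr ⟨q, hq', hx⟩

theorem pv_mem_norm (pats : List String) (x : String) :
    x ∈ normalize_helper_supported_urls pats ↔
      (∃ p ∈ pats, x = PySem.Str.lower (PySem.Str.strip p)) ∧ x ≠ "" := by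
  unfold normalize_helper_supported_urls
  rw [show (PySem.Set.empty : PySem.Set String) = ([] : List String) from rfl]
  rw [pv_norm_collapse pats ([] : List String)]
  simp only [pv_mem_foldl_pvG]
  constructor
  · rintro (h | ⟨p, hp, rfl, hne⟩)
    · simp at h
    · exact ⟨⟨p, hp, rfl⟩, hne⟩
  · rintro ⟨⟨p, hp, rfl⟩, hne⟩
    exact Or.inr ⟨p, hp, rfl, hne⟩

theorem pv_mem_Bpatterns (pats : List String) (x : String) :
    x ∈ pvBpatterns pats ↔
      (∃ p ∈ pats, x = PySem.Str.lower (PySem.Str.strip p)) ∧ x ≠ "" := by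
  unfold pvBpatterns
  simp only [List.mem_filter, List.mem_map, Bool.not_eq_eq_eq_not, Bool.not_true,
    beq_eq_false_iff_ne]
  constructor
  · rintro ⟨⟨p, hp, rfl⟩, hne⟩
    exact ⟨⟨p, hp, rfl⟩, hne⟩
  · rintro ⟨⟨p, hp, rfl⟩, hne⟩
    exact ⟨⟨p, hp, rfl⟩, hne⟩

-- bucket lookup = filter by first character
theorem pv_getD_buckets (patterns : List String) (c : Char) :
    (pvBbuckets patterns).getD c [] =
      patterns.filter (fun p => p.toList.headD ' ' == c) := by
  unfold pvBbuckets
  have h1 : patterns.foldl (fun d p => d.modify (p.toList.headD ' ') [] (· ++ [p]))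
        PySem.Dict.empty
      = (patterns.map (fun p => (p.toList.headD ' ', p))).foldl
          (fun (d : PySem.Dict Char (List String)) q => d.modify q.1 [] (· ++ [q.2]))
          PySem.Dict.empty := by
    rw [List.foldl_map]
  rw [h1, PySem.Dict.getD_foldl_modify_append, PySem.Dict.getD_empty, List.nil_append,
    List.filter_map, List.map_map]
  simp [Function.comp_def]

-- the bucketed position scan equals the naive any-substring test (patterns all nonempty)
theorem pv_matches_eq (patterns : List String) (hne : ∀ p ∈ patterns, p ≠ "") (link : String) :
    pvBmatches (pvBbuckets patterns) link
      = patterns.any (fun p => PySem.Str.isIn p (PySem.Str.lower (PySem.Str.strip link))) := by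
  unfold pvBmatches
  set url := PySem.Str.lower (PySem.Str.strip link) with hurl
  rw [Bool.eq_iff_iff]
  simp only [List.any_eq_true, PySem.List.mem_enumerate_iff, pv_getD_buckets,
    List.mem_filter, PySem.Str.isIn_iff_infix]
  generalize url.toList = L
  constructor
  · rintro ⟨q, ⟨k, hk, rfl⟩, p, ⟨hp, _⟩, hpre⟩
    refine ⟨p, hp, ?_⟩
    have hpre' : p.toList <+: L.drop k := by
      simpa using List.isPrefixOf_iff_prefix.mp hpre
    rcases hpre' with ⟨t, ht⟩
    exact ⟨L.take k, t, by
      rw [List.append_assoc, ht, List.take_append_drop]⟩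
  · rintro ⟨p, hp, s, t, hst⟩
    have hplen : 0 < p.toList.length := by
      have := hne p hp
      cases hpt : p.toList with
      | nil => exact absurd (String.toList_inj.mp (by simpa using hpt)) this
      | cons a l => simp
    have hk : s.length < L.length := by
      rw [← hst]
      simp only [List.length_append]
      omega
    have hdrop : L.drop s.length = p.toList ++ t := by
      rw [← hst, List.append_assoc, List.drop_left]
    have hget : L[s.length]'hk = p.toList.headD ' ' := by
      have h0 : (p.toList ++ t)[0]? = p.toList[0]? := by
        rw [List.getElem?_append_left hplen]
      have hdg : (List.drop s.length L)[0]? = L[s.length + 0]? := List.getElem?_drop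
      rw [hdrop, h0] at hdg
      have : L[s.length]? = p.toList[0]? := by
        simpa using hdg.symm
      cases hpt : p.toList with
      | nil => rw [hpt] at hplen; simp at hplen
      | cons a l =>
        simp only [hpt] at this ⊢
        have := this
        simp only [List.getElem?_eq_getElem hk] at this
        simp only [List.getElem?_cons_zero, Option.some_inj] at this
        simp [this]
    refine ⟨((s.length : Int), L[s.length]'hk), ⟨s.length, hk, by simp⟩,
      p, ⟨hp, by simp [hget]⟩, ?_⟩
    rw [List.isPrefixOf_iff_prefix]
    simp only [Int.toNat_natCast]
    exact ⟨t, hdrop.symm⟩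

theorem pv_isIn_empty (p : String) (hp : p ≠ "") : PySem.Str.isIn p "" = false := by
  by_contra h
  simp only [Bool.not_eq_false] at h
  have h3 := (PySem.Str.isIn_iff_infix p "").mp h
  simp only [show ("" : String).toList = [] from rfl, List.infix_nil] at h3
  exact hp (String.toList_inj.mp (by simpa using h3))

-- A's per-link predicate = B's bucketed matcher
theorem pv_pred_eq (pats : List String) (link : String) :
    (!(PySem.Str.lower (extract_helper_candidate_url link) == "") &&
      (normalize_helper_supported_urls pats).any
        (fun pattern => PySem.Str.isIn pattern (PySem.Str.lower (extract_helper_candidate_url link))))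
    = pvBmatches (pvBbuckets (pvBpatterns pats)) link := by
  have hne : ∀ p ∈ pvBpatterns pats, p ≠ "" := fun p hp => ((pv_mem_Bpatterns pats p).mp hp).2
  rw [pv_matches_eq (pvBpatterns pats) hne link]
  unfold extract_helper_candidate_url
  set c := PySem.Str.lower (PySem.Str.strip link) with hc
  by_cases hce : c = ""
  · rw [hce]
    simp only [beq_self_eq_true, Bool.not_true, Bool.false_and]
    symm
    simp only [List.any_eq_false]
    intro p hp
    simpa using pv_isIn_empty p (hne p hp)
  · have hcb : (c == "") = false := beq_eq_false_iff_ne.mpr hce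
    rw [hcb]
    simp only [Bool.not_false, Bool.true_and]
    rw [Bool.eq_iff_iff]
    simp only [List.any_eq_true]
    constructor
    · rintro ⟨p, hp, hpin⟩
      exact ⟨p, (pv_mem_Bpatterns pats p).mpr ((pv_mem_norm pats p).mp hp), hpin⟩
    · rintro ⟨p, hp, hpin⟩
      exact ⟨p, (pv_mem_norm pats p).mpr ((pv_mem_Bpatterns pats p).mp hp), hpin⟩

theorem pv_partition (P : String → Bool) (l : List String) (a b : List String) :
    l.foldl (fun (acc : List String × List String) link =>
        if P link then (acc.1 ++ [link], acc.2) else (acc.1, acc.2 ++ [link])) (a, b)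
      = (a ++ l.filter P, b ++ l.filter (fun x => !P x)) := by
  induction l generalizing a b with
  | nil => simp
  | cons x t ih =>
    simp only [List.foldl_cons]
    by_cases h : P x = true
    · simp [h, ih]
    · simp only [Bool.not_eq_true] at h
      simp [h, ih]

theorem pv_empty_iff (pats : List String) :
    normalize_helper_supported_urls pats = [] ↔ pvBpatterns pats = [] := by
  rw [List.eq_nil_iff_forall_not_mem, List.eq_nil_iff_forall_not_mem]
  constructor <;> intro h x hx
  · exact h x ((pv_mem_norm pats x).mpr ((pv_mem_Bpatterns pats x).mp hx))
  · exact h x ((pv_mem_Bpatterns pats x).mpr ((pv_mem_norm pats x).mp hx))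

theorem pv_zip_filter_pos (f : String → Bool) (l : List String) :
    ((l.zip (l.map f)).filter (fun q => q.2)).map (fun q => q.1) = l.filter f := by
  induction l with
  | nil => rfl
  | cons x t ih =>
    simp only [List.map_cons, List.zip_cons_cons, List.filter_cons]
    by_cases h : f x = true
    · simp [h, ih]
    · simp only [Bool.not_eq_true] at h
      simp [h, ih]

theorem pv_zip_filter_neg (f : String → Bool) (l : List String) :
    ((l.zip (l.map f)).filter (fun q => !q.2)).map (fun q => q.1) = l.filter (fun x => !f x) := by
  induction l with
  | nil => rfl
  | cons x t ih =>
    simp only [List.map_cons, List.zip_cons_cons, List.filter_cons]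
    by_cases h : f x = true
    · simp [h, ih]
    · simp only [Bool.not_eq_true] at h
      simp [h, ih]

-- ===== VERDICT (by name: the statement is the Claim_ definition above) =====
theorem prioritize_helper_supported_links_spec : Claim_equal_prioritize_helper_supported_links := by
  intro links pats _
  unfold Spec_prioritize_helper_supported_links
  unfold prioritize_helper_supported_links prioritize_helper_supported_links_alt
  by_cases hN : normalize_helper_supported_urls pats = []
  · have hS : pvBpatterns pats = [] := (pv_empty_iff pats).mp hN
    simp [hN, hS]
  · have hS : pvBpatterns pats ≠ [] := fun h => hN ((pv_empty_iff pats).mpr h)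
    simp only [beq_iff_eq, if_neg hN, if_neg hS]
    have hfun : (fun link => !(PySem.Str.lower (extract_helper_candidate_url link) == "") &&
        (normalize_helper_supported_urls pats).any
          (fun pattern => PySem.Str.isIn pattern (PySem.Str.lower (extract_helper_candidate_url link))))
        = pvBmatches (pvBbuckets (pvBpatterns pats)) := funext (fun link => pv_pred_eq pats link)
    simp only [← hfun]
    rw [pv_partition (fun link => !(PySem.Str.lower (extract_helper_candidate_url link) == "") &&
        (normalize_helper_supported_urls pats).any
          (fun pattern => PySem.Str.isIn pattern (PySem.Str.lower (extract_helper_candidate_url link)))) links [] []]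
    simp only [List.nil_append, pv_zip_filter_pos, pv_zip_filter_neg]
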